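-- pv_equiv track=rewrite | github.com/pypi-data/pypi-mirror-270 | packages/miakosections/miakosections-0.1.0.tar.gz/miakosections-0.1.0/src/miakosections/helpers.py | sort_from_middle
-- ===== SOURCE A (Python) =====
-- def sort_from_middle(lst):
--     """Sorts a list starting from the middle and then alternating between the left and right.
--
--     :param lst: List of elements to be sorted.
--     :return: List sorted from the middle outward.
--     """
--     n = len(lst)
--     mid = n // 2  # Integer division to find the middle index
--
--     # Using list slicing and stepping to create left and right parts
--     left_part = lst[:mid][::-1]  # Reverse the left half
--     right_part = lst[mid:] if n % 2 == 0 else lst[mid + 1 :]  # Exclude middle if odd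
--
--     # Initialize result list
--     result = []
--
--     # Interleave elements from the left and right parts
--     if n % 2 != 0:
--         result.append(lst[mid])  # Start with the middle element if odd length
--
--     # Add elements alternating from left and right
--     for l, r in zip(left_part, right_part, strict=False):
--         result.append(l)
--         result.append(r)
--
--     # Add any leftover elements if the lists were uneven
--     if len(left_part) > len(right_part):
--         result.extend(left_part[len(right_part) :])
--     elif len(right_part) > len(left_part):
--         result.extend(right_part[len(left_part) :])
--
--     return result
-- ===== SOURCE B (Python) =====
-- def sort_from_middle(lst):
--     """Sorts a list starting from the middle and then alternating between the left and right.
--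
--     :param lst: List of elements to be sorted.
--     :return: List sorted from the middle outward.
--     """
--     n = len(lst)
--     mid = n // 2
--     if n % 2:
--         result = [lst[mid]]
--         left, right = mid - 1, mid + 1
--     else:
--         result = []
--         left, right = mid - 1, mid
--     while left >= 0 and right < n:
--         result.append(lst[left])
--         result.append(lst[right])
--         left -= 1
--         right += 1
--     return result
-- ===== Notes on version B (the rewrite author's own statement) =====
-- stated objective: simpler
-- what changed: B walks two indices outward from the middle in one while-loop, replacing A's reversed/forward slice construction, zip interleaving and the (always dead) leftover-extend branches.
import Mathlib
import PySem

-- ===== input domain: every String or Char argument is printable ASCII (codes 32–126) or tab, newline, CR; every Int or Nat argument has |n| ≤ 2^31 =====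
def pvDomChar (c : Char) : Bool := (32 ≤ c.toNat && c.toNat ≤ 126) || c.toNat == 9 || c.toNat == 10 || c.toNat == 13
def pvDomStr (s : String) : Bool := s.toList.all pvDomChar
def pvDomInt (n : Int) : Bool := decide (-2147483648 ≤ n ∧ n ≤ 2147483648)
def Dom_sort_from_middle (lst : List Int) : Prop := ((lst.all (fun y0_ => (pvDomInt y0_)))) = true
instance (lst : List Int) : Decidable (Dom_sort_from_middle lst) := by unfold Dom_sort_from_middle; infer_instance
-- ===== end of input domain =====

-- B replaces A's slice/zip/leftover construction by a single two-pointer loop walking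
-- outward from the middle (objective: simpler). Equivalence of return values is proved below.

-- ===== PORT A =====
def sort_from_middle (lst : List Int) : List Int :=
  let n : Int := lst.length
  let mid : Int := PySem.Int.floordiv n 2
  -- lst[:mid][::-1]; step -1 ≠ 0, so slice? is always some (getD default never read)
  let left_part : List Int :=
    (PySem.List.slice? (PySem.List.slice lst none (some mid)) none none (-1)).getD []
  let right_part : List Int :=
    if PySem.Int.mod n 2 == 0 then PySem.List.slice lst (some mid) none
    else PySem.List.slice lst (some (mid + 1)) none
  let result : List Int :=
    if PySem.Int.mod n 2 ≠ 0 then [PySem.List.pyGetD lst mid 0]  -- lst[mid]: mid in range when n odd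
    else []
  let result := (left_part.zip right_part).foldl (fun acc p => acc ++ [p.1, p.2]) result
  if left_part.length > right_part.length then
    result ++ PySem.List.slice left_part (some (right_part.length : Int)) none
  else if right_part.length > left_part.length then
    result ++ PySem.List.slice right_part (some (left_part.length : Int)) none
  else result

-- ===== PORT B =====
-- the while-loop of Source B: while left >= 0 and right < n: append lst[left]; append lst[right]
def sfmLoop (lst : List Int) (n : Int) (acc : List Int) (l r : Int) : List Int :=
  if _h : 0 ≤ l ∧ r < n then
    -- indices are always in range here, so pyGetD is exact for lst[left] / lst[right]
    sfmLoop lst n (acc ++ [PySem.List.pyGetD lst l 0, PySem.List.pyGetD lst r 0]) (l - 1) (r + 1)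
  else acc
termination_by (n - r).toNat
decreasing_by omega

def sort_from_middle_alt (lst : List Int) : List Int :=
  let n : Int := lst.length
  let mid : Int := PySem.Int.floordiv n 2
  if PySem.Int.mod n 2 ≠ 0 then
    sfmLoop lst n [PySem.List.pyGetD lst mid 0] (mid - 1) (mid + 1)
  else
    sfmLoop lst n [] (mid - 1) mid

-- ===== PRECONDITION & SPEC =====
def Spec_sort_from_middle (lst : List Int) (out : List Int) : Prop := out = sort_from_middle_alt lst
instance (lst : List Int) (out : List Int) : Decidable (Spec_sort_from_middle lst out) := by unfold Spec_sort_from_middle; infer_instance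

-- ===== CLAIM (what is proved, stated in full; the proofs are below) =====
def Claim_equal_sort_from_middle : Prop := ∀ (lst : List Int), Dom_sort_from_middle lst → Spec_sort_from_middle lst (sort_from_middle lst)

-- ===== LEMMAS AND PROOFS =====

-- the loop produces the interleaving of lst[k-1],…,lst[0] with lst[r],…,lst[n-1]
lemma sfmLoop_eq (k : Nat) : ∀ (lst : List Int) (r : Nat) (acc : List Int),
    k ≤ r → k + r = lst.length →
    sfmLoop lst (lst.length : Int) acc ((k : Int) - 1) (r : Int)
      = acc ++ ((lst.take k).reverse.zip (lst.drop r)).flatMap (fun p => [p.1, p.2]) := by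
  induction k with
  | zero =>
    intro lst r acc _ _
    rw [sfmLoop]
    simp
  | succ k ih =>
    intro lst r acc hkr hlen
    have hkn : k < lst.length := by omega
    have hrn : r < lst.length := by omega
    rw [sfmLoop]
    have hcond : 0 ≤ ((k : Int) + 1) - 1 ∧ (r : Int) < (lst.length : Int) := by
      constructor <;> omega
    push_cast
    rw [dif_pos (by exact hcond)]
    have e1 : ((k : Int) + 1 - 1) - 1 = (k : Int) - 1 := by ring
    have e2 : ((k : Int) + 1 - 1) = (k : Int) := by ring
    have e3 : ((r : Int) + 1) = ((r + 1 : Nat) : Int) := by push_cast; ring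
    rw [e1, e2, e3, ih lst (r + 1) _ (by omega) (by omega)]
    have hget_k : PySem.List.pyGetD lst (k : Int) 0 = lst[k] := by
      rw [PySem.List.pyGetD_natCast]
      exact List.getD_eq_getElem lst 0 hkn
    have hget_r : PySem.List.pyGetD lst (r : Int) 0 = lst[r] := by
      rw [PySem.List.pyGetD_natCast]
      exact List.getD_eq_getElem lst 0 hrn
    have htake : (lst.take (k + 1)).reverse = lst[k] :: (lst.take k).reverse := by
      rw [List.take_add_one, List.getElem?_eq_getElem hkn]
      simp
    have hdrop : lst.drop r = lst[r] :: lst.drop (r + 1) := List.drop_eq_getElem_cons hrn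
    rw [hget_k, hget_r, htake, hdrop, List.zip_cons_cons]
    simp

-- ===== VERDICT (by name: the statement is the Claim_ definition above) =====
theorem sort_from_middle_spec : Claim_equal_sort_from_middle := by
  intro lst _
  unfold Spec_sort_from_middle sort_from_middle sort_from_middle_alt
  have hmid : PySem.Int.floordiv (lst.length : Int) 2 = ((lst.length / 2 : Nat) : Int) := by
    exact_mod_cast PySem.Int.floordiv_natCast lst.length 2
  have hmod : PySem.Int.mod (lst.length : Int) 2 = ((lst.length % 2 : Nat) : Int) := by
    exact_mod_cast PySem.Int.mod_natCast lst.length 2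
  have hslice_take : PySem.List.slice lst none (some ((lst.length / 2 : Nat) : Int))
      = lst.take (lst.length / 2) := PySem.List.slice_to_natCast lst (lst.length / 2)
  have hrev : (PySem.List.slice? (lst.take (lst.length / 2)) none none (-1)).getD []
      = (lst.take (lst.length / 2)).reverse := by
    rw [PySem.List.slice?_none_none_neg_one]; rfl
  have hlenL : (lst.take (lst.length / 2)).reverse.length = lst.length / 2 := by
    simp; omega
  rcases Nat.even_or_odd lst.length with he | ho
  · -- even length
    have h2 : lst.length % 2 = 0 := Nat.even_iff.mp he
    have hR : PySem.List.slice lst (some ((lst.length / 2 : Nat) : Int)) none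
        = lst.drop (lst.length / 2) := PySem.List.slice_from_natCast lst (lst.length / 2)
    have hlenR : (lst.drop (lst.length / 2)).length = lst.length / 2 := by simp; omega
    simp only [hmid, hmod, h2, hslice_take, hrev, hR, Nat.cast_zero, ne_eq,
      not_true_eq_false, if_false, beq_self_eq_true, if_true, hlenL, hlenR,
      gt_iff_lt, lt_irrefl]
    rw [PySem.List.foldl_append_eq_flatMap,
      sfmLoop_eq (lst.length / 2) lst (lst.length / 2) [] (le_refl _) (by omega)]
  · -- odd length
    have h2 : lst.length % 2 = 1 := Nat.odd_iff.mp ho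
    have hR : PySem.List.slice lst (some (((lst.length / 2 : Nat) : Int) + 1)) none
        = lst.drop (lst.length / 2 + 1) := by
      rw [show ((lst.length / 2 : Nat) : Int) + 1 = ((lst.length / 2 + 1 : Nat) : Int) by push_cast; ring]
      exact PySem.List.slice_from_natCast lst (lst.length / 2 + 1)
    have hlenR : (lst.drop (lst.length / 2 + 1)).length = lst.length / 2 := by simp; omega
    simp only [hmid, hmod, h2, hslice_take, hrev, hR, Nat.cast_one,
      (show (((1 : Int)) == 0) = false from rfl), Bool.false_eq_true, if_false,
      ne_eq, one_ne_zero, not_false_eq_true, if_true, hlenL, hlenR,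
      gt_iff_lt, lt_irrefl]
    rw [PySem.List.foldl_append_eq_flatMap,
      show ((lst.length / 2 : Nat) : Int) + 1 = ((lst.length / 2 + 1 : Nat) : Int) by push_cast; ring,
      sfmLoop_eq (lst.length / 2) lst (lst.length / 2 + 1)
        [PySem.List.pyGetD lst ((lst.length / 2 : Nat) : Int) 0] (by omega) (by omega)]
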